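-- pv_equiv track=rewrite | github.com/Tribler/py-ipv8 | github_increment_version.py | commit_messages_to_names
-- ===== SOURCE A (Python) =====
-- def commit_messages_to_names(commit_msg_list: list[str]) -> list[str]:
--     """
--     Humans are not computers. Correct some common mistakes.
--     """
--     out = []
--     misspellings = {
--         "add ": "Added ",
--         "Add ": "Added ",
--         "ADD ": "Added ",
--         "added ": "Added ",
--         "ADDED ": "Added ",
--         "fix ": "Fixed ",
--         "Fix ": "Fixed ",
--         "FIX ": "Fixed ",
--         "fixed ": "Fixed ",
--         "FIXED ": "Fixed ",
--         "update ": "Updated ",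
--         "Update ": "Updated ",
--         "UPDATE ": "Updated ",
--         "updated ": "Updated ",
--         "UPDATED ": "Updated ",
--         "remove ": "Removed ",
--         "Remove ": "Removed ",
--         "REMOVE ": "Removed ",
--         "removed ": "Removed ",
--         "REMOVED ": "Removed "
--     }
--     residual_prefixes = {
--         "READY: ": "",
--         "ready: ": "",
--         "Ready: ": "",
--         "READY ": "",
--         "ready ": "",
--         "Ready ": "",
--         "WIP: ": "",
--         "wip: ": "",
--         "Wip: ": "",
--         "WIP ": "",
--         "wip ": "",
--         "Wip ": "",
--         "[READY] ": "",
--         "[WIP] ": ""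
--     }
--     for commit_msg in commit_msg_list:
--         corrected = commit_msg
--         # First, strip residual prefixes, e.g. "READY: Add some feature" -> "Add some feature".
--         for mistake, correction in residual_prefixes.items():
--             if commit_msg.startswith(mistake):
--                 corrected = correction + commit_msg[len(mistake):]
--         # Second, modify misspellings, e.g. "Add some feature" -> "Added some feature".
--         # We do this after the first step to correct compound errors (both leaving the prefix AND not adhering to
--         # the naming standard).
--         for mistake, correction in misspellings.items():
--             if corrected.startswith(mistake):
--                 corrected = correction + corrected[len(mistake):]
--         out.append(corrected)
--     return sorted(out)
-- ===== SOURCE B (Python) =====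
-- # Derive both correction tables from four verb stems and two prefix stems instead of
-- # hard-coding 34 keys, tokenize each message at its first space, and build the result
-- # by inserting each corrected message at the position found by a binary search (incremental sorted insert).
--
-- def _past(stem):
--     return stem + ("d" if stem.endswith("e") else "ed")
--
--
-- def _build_tables():
--     residual = set()
--     for w in ("ready", "wip"):
--         for c in (w, w.capitalize(), w.upper()):
--             residual.add(c + ":")
--             residual.add(c)
--         residual.add("[" + w.upper() + "]")
--     verbs = {}
--     for w in ("add", "fix", "update", "remove"):
--         fixed = _past(w).capitalize()
--         for k in (w, w.capitalize(), w.upper(), _past(w), _past(w).upper()):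
--             verbs[k] = fixed
--     return residual, verbs
--
--
-- _RESIDUAL, _VERBS = _build_tables()
--
--
-- def _canon(msg):
--     parts = msg.split(" ", 1)
--     if len(parts) == 2 and parts[0] in _RESIDUAL:
--         msg = parts[1]
--         parts = msg.split(" ", 1)
--     if len(parts) == 2 and parts[0] in _VERBS:
--         msg = _VERBS[parts[0]] + " " + parts[1]
--     return msg
--
--
-- def _insort(out, c):
--     lo, hi = 0, len(out)
--     while lo < hi:
--         mid = (lo + hi) // 2
--         if out[mid] < c:
--             lo = mid + 1
--         else:
--             hi = mid
--     out.insert(lo, c)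
--
--
-- def commit_messages_to_names(commit_msg_list: list[str]) -> list[str]:
--     out = []
--     for msg in commit_msg_list:
--         _insort(out, _canon(msg))
--     return out
-- ===== Notes on version B (the rewrite author's own statement) =====
-- stated objective: alternative
-- what changed: B derives the 14 residual-prefix and 20 verb keys from six stems instead of hard-coding them, tokenizes each message once at its first space and corrects it by set/dict lookup on that token instead of scanning all 34 keys with startswith, and builds the output by binary-search insertion of each corrected message into a sorted accumulator instead of a final sorted() pass.
import Mathlib
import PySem

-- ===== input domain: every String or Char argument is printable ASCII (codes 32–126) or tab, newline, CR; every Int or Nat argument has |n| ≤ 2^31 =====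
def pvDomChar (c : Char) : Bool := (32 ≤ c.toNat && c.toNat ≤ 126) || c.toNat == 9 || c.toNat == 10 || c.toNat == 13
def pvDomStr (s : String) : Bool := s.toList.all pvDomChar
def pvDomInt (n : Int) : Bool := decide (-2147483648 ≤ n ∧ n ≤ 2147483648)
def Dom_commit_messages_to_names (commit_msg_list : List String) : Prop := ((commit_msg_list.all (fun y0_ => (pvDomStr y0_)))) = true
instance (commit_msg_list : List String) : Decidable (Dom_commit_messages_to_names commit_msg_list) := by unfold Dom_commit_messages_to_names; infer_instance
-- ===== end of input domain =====

-- B derives both correction tables from six stems instead of hard-coding 34 keys, tokenizes each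
-- message at its first space (split with maxsplit=1) instead of scanning every key with startswith,
-- and builds the result by binary-search insertion of each corrected message into a sorted
-- accumulator instead of a final sorted() pass (objective: alternative; same return values).
-- Strings are handled as code-point lists via PySem.Chars (exact on the ASCII domain above).

-- ===== PORT A =====
-- the dict literals of A, as association lists in insertion order (each value of residual_prefixes is "")
def pvResidualA : List (List Char × List Char) := [("READY: ".toList, "".toList), ("ready: ".toList, "".toList), ("Ready: ".toList, "".toList), ("READY ".toList, "".toList), ("ready ".toList, "".toList), ("Ready ".toList, "".toList), ("WIP: ".toList, "".toList), ("wip: ".toList, "".toList), ("Wip: ".toList, "".toList), ("WIP ".toList, "".toList), ("wip ".toList, "".toList), ("Wip ".toList, "".toList), ("[READY] ".toList, "".toList), ("[WIP] ".toList, "".toList)]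

def pvMisspellA : List (List Char × List Char) := [("add ".toList, "Added ".toList), ("Add ".toList, "Added ".toList), ("ADD ".toList, "Added ".toList), ("added ".toList, "Added ".toList), ("ADDED ".toList, "Added ".toList), ("fix ".toList, "Fixed ".toList), ("Fix ".toList, "Fixed ".toList), ("FIX ".toList, "Fixed ".toList), ("fixed ".toList, "Fixed ".toList), ("FIXED ".toList, "Fixed ".toList), ("update ".toList, "Updated ".toList), ("Update ".toList, "Updated ".toList), ("UPDATE ".toList, "Updated ".toList), ("updated ".toList, "Updated ".toList), ("UPDATED ".toList, "Updated ".toList), ("remove ".toList, "Removed ".toList), ("Remove ".toList, "Removed ".toList), ("REMOVE ".toList, "Removed ".toList), ("removed ".toList, "Removed ".toList), ("REMOVED ".toList, "Removed ".toList)]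

-- "for mistake, correction in residual_prefixes.items(): if commit_msg.startswith(mistake): corrected = correction + commit_msg[len(mistake):]"
def pvStepA (commit_msg : List Char) : List Char :=
  let corrected := pvResidualA.foldl (fun corrected kv =>
    if PySem.Chars.startswith commit_msg kv.1 then
      kv.2 ++ PySem.Chars.slice commit_msg (some (PySem.Chars.len kv.1)) none
    else corrected) commit_msg
  pvMisspellA.foldl (fun corrected kv =>
    if PySem.Chars.startswith corrected kv.1 then
      kv.2 ++ PySem.Chars.slice corrected (some (PySem.Chars.len kv.1)) none
    else corrected) corrected

def commit_messages_to_names (commit_msg_list : List String) : List String :=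
  let out := commit_msg_list.foldl (fun out commit_msg => out ++ [String.ofList (pvStepA commit_msg.toList)]) []
  PySem.List.sorted out (fun x => x) false

-- ===== PORT B =====
-- _past(stem) of Source B
def pvPast (stem : List Char) : List Char :=
  stem ++ (if PySem.Chars.endswith stem "e".toList then "d".toList else "ed".toList)

-- Python str.capitalize (first char upper, rest lower); exact on the ASCII stems it is applied to
def pvCapitalize (cs : List Char) : List Char :=
  match cs with
  | [] => []
  | c :: r => PySem.Chars.upperChar c :: PySem.Chars.lower r

-- _build_tables() of Source B: the residual-prefix set and the verb dict, generated from six stems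
def pvTables : PySem.Set (List Char) × PySem.Dict (List Char) (List Char) :=
  let residual := ["ready".toList, "wip".toList].foldl (fun s w =>
    let s := [w, pvCapitalize w, PySem.Chars.upper w].foldl
      (fun s c => PySem.Set.add (PySem.Set.add s (c ++ ":".toList)) c) s
    PySem.Set.add s ("[".toList ++ PySem.Chars.upper w ++ "]".toList)) PySem.Set.empty
  let verbs := ["add".toList, "fix".toList, "update".toList, "remove".toList].foldl (fun d w =>
    let fixed := pvCapitalize (pvPast w)
    [w, pvCapitalize w, PySem.Chars.upper w, pvPast w, PySem.Chars.upper (pvPast w)].foldl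
      (fun d k => PySem.Dict.insert d k fixed) d) PySem.Dict.empty
  (residual, verbs)

-- _canon(msg) of Source B: "parts = msg.split(' ', 1); if len(parts) == 2 and parts[0] in _RESIDUAL: …"
-- (the guarded _VERBS[parts[0]] lookup is getD with an unreachable default)
def pvCanonB (msg0 : List Char) : List Char :=
  let parts := PySem.Chars.splitOnMax msg0 " ".toList 1
  let (msg, parts) :=
    if parts.length = 2 ∧ PySem.Set.contains pvTables.1 (parts.getD 0 []) then
      let m := parts.getD 1 []
      (m, PySem.Chars.splitOnMax m " ".toList 1)
    else (msg0, parts)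
  if parts.length = 2 ∧ PySem.Dict.contains pvTables.2 (parts.getD 0 []) then
    PySem.Dict.getD pvTables.2 (parts.getD 0 []) [] ++ " ".toList ++ parts.getD 1 []
  else msg

-- the while-loop of _insort(out, c) in Source B: binary search for the insertion point
-- (lo, hi stay in [0, len(out)], so Nat mirrors Python's ints and (lo+hi)//2 is Nat division;
--  out[mid] is always in range, ported as getD)
def pvBisect (out : List String) (c : String) (lo hi : Nat) : Nat :=
  if lo < hi then
    let mid := (lo + hi) / 2
    if out.getD mid "" < c then pvBisect out c (mid + 1) hi
    else pvBisect out c lo mid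
  else lo
termination_by hi - lo
decreasing_by all_goals omega

-- "out.insert(lo, c)" at the found position
def pvInsort (out : List String) (c : String) : List String :=
  out.insertIdx (pvBisect out c 0 out.length) c

def commit_messages_to_names_alt (commit_msg_list : List String) : List String :=
  commit_msg_list.foldl (fun out msg => pvInsort out (String.ofList (pvCanonB msg.toList))) []

-- ===== PRECONDITION & SPEC =====
def Spec_commit_messages_to_names (commit_msg_list : List String) (out : List String) : Prop := out = commit_messages_to_names_alt commit_msg_list
instance (commit_msg_list : List String) (out : List String) : Decidable (Spec_commit_messages_to_names commit_msg_list out) := by unfold Spec_commit_messages_to_names; infer_instance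

-- ===== CLAIM (what is proved, stated in full; the proofs are below) =====
def Claim_equal_commit_messages_to_names : Prop := ∀ (commit_msg_list : List String), Dom_commit_messages_to_names commit_msg_list → Spec_commit_messages_to_names commit_msg_list (commit_messages_to_names commit_msg_list)

-- ===== LEMMAS AND PROOFS =====

-- every string splits at its first space: cs = p ++ ' ' :: r with ' ' ∉ p
theorem pv_split_first (cs : List Char) (h : ' ' ∈ cs) :
    ∃ p r, cs = p ++ ' ' :: r ∧ ' ' ∉ p := by
  induction cs with
  | nil => cases h
  | cons c t ih =>
    by_cases hc : c = ' '
    · exact ⟨[], t, by simp [hc], by simp⟩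
    · obtain ⟨p, r, hpr, hp⟩ := ih (by rcases List.mem_cons.mp h with h1 | h1; exact absurd h1.symm hc; exact h1)
      exact ⟨c :: p, r, by simp [hpr], by simp [hp]; exact fun h => hc h.symm⟩

-- behaviour of split's worker once the budget is exhausted
theorem pv_go_zero (fuel : Nat) (l cur : List Char) (acc : List (List Char)) :
    PySem.Chars.splitOnMax.go [' '] fuel 0 l cur acc = ((cur.reverse ++ l) :: acc).reverse := by
  cases fuel with
  | zero => rw [PySem.Chars.splitOnMax.go.eq_def]
  | succ f =>
    cases l with
    | nil => rw [PySem.Chars.splitOnMax.go.eq_def]; simp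
    | cons c rest => rw [PySem.Chars.splitOnMax.go.eq_def]; simp

-- split(" ", 1) on a string whose first space follows p
theorem pv_go_one_space (p : List Char) (r : List Char) : ∀ (fuel : Nat) (cur : List Char) (acc : List (List Char)),
    ' ' ∉ p → p.length < fuel →
    PySem.Chars.splitOnMax.go [' '] fuel 1 (p ++ ' ' :: r) cur acc = acc.reverse ++ [cur.reverse ++ p, r] := by
  induction p with
  | nil =>
    intro fuel cur acc _ hfuel
    cases fuel with
    | zero => omega
    | succ f =>
      rw [PySem.Chars.splitOnMax.go.eq_def]
      simp [List.isPrefixOf, pv_go_zero]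
  | cons c p' ih =>
    intro fuel cur acc hp hfuel
    cases fuel with
    | zero => omega
    | succ f =>
      have hc : c ≠ ' ' := fun h => hp (by simp [h])
      rw [PySem.Chars.splitOnMax.go.eq_def]
      simp only [List.cons_append]
      simp [List.isPrefixOf, Ne.symm hc]
      rw [ih f (c :: cur) acc (fun h => hp (by simp [h])) (by simpa using hfuel)]
      simp

theorem pv_go_one_nospace : ∀ (fuel : Nat) (l cur : List Char) (acc : List (List Char)),
    ' ' ∉ l →
    PySem.Chars.splitOnMax.go [' '] fuel 1 l cur acc = acc.reverse ++ [cur.reverse ++ l] := by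
  intro fuel
  induction fuel with
  | zero => intro l cur acc _; rw [PySem.Chars.splitOnMax.go.eq_def]; simp
  | succ f ih =>
    intro l cur acc hl
    cases l with
    | nil => rw [PySem.Chars.splitOnMax.go.eq_def]; simp
    | cons c rest =>
      have hc : c ≠ ' ' := fun h => hl (by simp [h])
      rw [PySem.Chars.splitOnMax.go.eq_def]
      simp [List.isPrefixOf, Ne.symm hc]
      rw [ih rest (c :: cur) acc (fun h => hl (by simp [h]))]
      simp

theorem pv_split_two (p r : List Char) (hp : ' ' ∉ p) :
    PySem.Chars.splitOnMax (p ++ ' ' :: r) [' '] 1 = [p, r] := by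
  rw [PySem.Chars.splitOnMax, if_neg (by omega)]
  rw [show Int.toNat 1 = 1 from rfl]
  rw [pv_go_one_space p r _ [] [] hp (by simp [List.length_append])]
  simp

theorem pv_split_one (l : List Char) (hl : ' ' ∉ l) :
    PySem.Chars.splitOnMax l [' '] 1 = [l] := by
  rw [PySem.Chars.splitOnMax, if_neg (by omega)]
  rw [show Int.toNat 1 = 1 from rfl]
  rw [pv_go_one_nospace _ l [] [] hl]
  simp

theorem pv_sw_aux : ∀ (w p : List Char) (r : List Char), ' ' ∉ p → ' ' ∉ w →
    ((w ++ [' ']) <+: (p ++ ' ' :: r)) → p = w := by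
  intro w
  induction w with
  | nil =>
    intro p r hp _ hpre
    cases p with
    | nil => rfl
    | cons c p' =>
      simp only [List.nil_append, List.cons_append, List.cons_prefix_cons] at hpre
      exact absurd (show (' ' : Char) ∈ c :: p' from by exact List.mem_cons.mpr (Or.inl hpre.1)) hp
  | cons a w' ih =>
    intro p r hp hw hpre
    cases p with
    | nil =>
      simp only [List.cons_append, List.nil_append, List.cons_prefix_cons] at hpre
      exact absurd (show (' ' : Char) ∈ a :: w' from by simp [hpre.1]) hw
    | cons c p' =>
      simp only [List.cons_append, List.cons_prefix_cons] at hpre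
      have := ih p' r (fun h => hp (List.mem_cons_of_mem _ h)) (fun h => hw (List.mem_cons_of_mem _ h)) hpre.2
      simp [this, hpre.1]

-- "msg starts with the key w++' '" is exactly "the first word of msg is w"
theorem pv_sw (p r w : List Char) (hp : ' ' ∉ p) (hw : ' ' ∉ w) :
    PySem.Chars.startswith (p ++ ' ' :: r) (w ++ [' ']) = decide (p = w) := by
  by_cases h : p = w
  · subst h
    simp only [decide_true]
    exact (PySem.Chars.startswith_iff _ _).mpr ⟨r, by simp⟩
  · simp only [h, decide_false]
    rw [← Bool.not_eq_true]
    intro hc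
    exact h (pv_sw_aux w p r hp hw ((PySem.Chars.startswith_iff _ _).mp hc))

theorem pv_sw_nospace (s k : List Char) (hs : ' ' ∉ s) (hk : ' ' ∈ k) :
    PySem.Chars.startswith s k = false := by
  rw [← Bool.not_eq_true]
  intro hc
  exact hs (((PySem.Chars.startswith_iff s k).mp hc).subset hk)

-- the generated tables, evaluated
theorem pv_res_lit : pvTables.1 = (["ready:".toList, "ready".toList, "Ready:".toList, "Ready".toList, "READY:".toList, "READY".toList, "[READY]".toList, "wip:".toList, "wip".toList, "Wip:".toList, "Wip".toList, "WIP:".toList, "WIP".toList, "[WIP]".toList] : List (List Char)) := by decide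

theorem pv_verb_lit : pvTables.2 = PySem.Dict.mk [("add".toList, "Added".toList), ("Add".toList, "Added".toList), ("ADD".toList, "Added".toList), ("added".toList, "Added".toList), ("ADDED".toList, "Added".toList), ("fix".toList, "Fixed".toList), ("Fix".toList, "Fixed".toList), ("FIX".toList, "Fixed".toList), ("fixed".toList, "Fixed".toList), ("FIXED".toList, "Fixed".toList), ("update".toList, "Updated".toList), ("Update".toList, "Updated".toList), ("UPDATE".toList, "Updated".toList), ("updated".toList, "Updated".toList), ("UPDATED".toList, "Updated".toList), ("remove".toList, "Removed".toList), ("Remove".toList, "Removed".toList), ("REMOVE".toList, "Removed".toList), ("removed".toList, "Removed".toList), ("REMOVED".toList, "Removed".toList)] := by decide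

-- proof-side decompositions of the two ports into their two phases
def pvPh1A (msg : List Char) : List Char :=
  pvResidualA.foldl (fun corrected kv =>
    if PySem.Chars.startswith msg kv.1 then
      kv.2 ++ PySem.Chars.slice msg (some (PySem.Chars.len kv.1)) none
    else corrected) msg

def pvPh2A (corrected : List Char) : List Char :=
  pvMisspellA.foldl (fun corrected kv =>
    if PySem.Chars.startswith corrected kv.1 then
      kv.2 ++ PySem.Chars.slice corrected (some (PySem.Chars.len kv.1)) none
    else corrected) corrected

def pvC1 (msg : List Char) : List Char :=
  let parts := PySem.Chars.splitOnMax msg " ".toList 1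
  if parts.length = 2 ∧ PySem.Set.contains pvTables.1 (parts.getD 0 []) then parts.getD 1 [] else msg

def pvC2 (msg : List Char) : List Char :=
  let parts := PySem.Chars.splitOnMax msg " ".toList 1
  if parts.length = 2 ∧ PySem.Dict.contains pvTables.2 (parts.getD 0 []) then
    PySem.Dict.getD pvTables.2 (parts.getD 0 []) [] ++ " ".toList ++ parts.getD 1 []
  else msg

theorem pvStepA_decomp (cs : List Char) : pvStepA cs = pvPh2A (pvPh1A cs) := rfl

theorem pvCanonB_decomp (cs : List Char) : pvCanonB cs = pvC2 (pvC1 cs) := by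
  by_cases hc : (PySem.Chars.splitOnMax cs " ".toList 1).length = 2 ∧
      PySem.Set.contains pvTables.1 ((PySem.Chars.splitOnMax cs " ".toList 1).getD 0 []) = true
  · unfold pvCanonB pvC1 pvC2
    simp only []
    simp only [if_pos hc]
  · unfold pvCanonB pvC1 pvC2
    simp only []
    simp only [if_neg hc]

theorem pv_ph1_eq (cs : List Char) : pvPh1A cs = pvC1 cs := by
  by_cases hsp : ' ' ∈ cs
  · obtain ⟨p, r, rfl, hp⟩ := pv_split_first cs hsp
    have hsplit := pv_split_two p r hp
    by_cases hmem : p ∈ (["ready:".toList, "ready".toList, "Ready:".toList, "Ready".toList, "READY:".toList, "READY".toList, "[READY]".toList, "wip:".toList, "wip".toList, "Wip:".toList, "Wip".toList, "WIP:".toList, "WIP".toList, "[WIP]".toList] : List (List Char))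
    · have hmemT : p ∈ pvTables.1 := by rw [pv_res_lit]; exact hmem
      simp only [List.mem_cons, List.not_mem_nil, or_false] at hmem
      rcases hmem with h | h | h | h | h | h | h | h | h | h | h | h | h | h <;> subst h <;>
        simp at hsplit hmemT <;>
        simp [pvPh1A, pvC1, pvResidualA, hsplit, hmemT,
          PySem.Chars.startswith, PySem.Chars.len_eq, PySem.List.slice_from]
    · have hmemF : p ∉ pvTables.1 := by rw [pv_res_lit]; exact hmem
      have hmm := hmem
      simp only [List.mem_cons, List.not_mem_nil, or_false, not_or] at hmm
      obtain ⟨hq0, hq1, hq2, hq3, hq4, hq5, hq6, hq7, hq8, hq9, hq10, hq11, hq12, hq13⟩ := hmm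
      simp only [pvPh1A, pvC1, pvResidualA, List.foldl]
      rw [show "READY: ".toList = "READY:".toList ++ [' '] from rfl,
        show "ready: ".toList = "ready:".toList ++ [' '] from rfl,
        show "Ready: ".toList = "Ready:".toList ++ [' '] from rfl,
        show "READY ".toList = "READY".toList ++ [' '] from rfl,
        show "ready ".toList = "ready".toList ++ [' '] from rfl,
        show "Ready ".toList = "Ready".toList ++ [' '] from rfl,
        show "WIP: ".toList = "WIP:".toList ++ [' '] from rfl,
        show "wip: ".toList = "wip:".toList ++ [' '] from rfl,
        show "Wip: ".toList = "Wip:".toList ++ [' '] from rfl,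
        show "WIP ".toList = "WIP".toList ++ [' '] from rfl,
        show "wip ".toList = "wip".toList ++ [' '] from rfl,
        show "Wip ".toList = "Wip".toList ++ [' '] from rfl,
        show "[READY] ".toList = "[READY]".toList ++ [' '] from rfl,
        show "[WIP] ".toList = "[WIP]".toList ++ [' '] from rfl,
        pv_sw p r _ hp (by decide),
        pv_sw p r _ hp (by decide),
        pv_sw p r _ hp (by decide),
        pv_sw p r _ hp (by decide),
        pv_sw p r _ hp (by decide),
        pv_sw p r _ hp (by decide),
        pv_sw p r _ hp (by decide),
        pv_sw p r _ hp (by decide),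
        pv_sw p r _ hp (by decide),
        pv_sw p r _ hp (by decide),
        pv_sw p r _ hp (by decide),
        pv_sw p r _ hp (by decide),
        pv_sw p r _ hp (by decide),
        pv_sw p r _ hp (by decide)]
      simp at hq0 hq1 hq2 hq3 hq4 hq5 hq6 hq7 hq8 hq9 hq10 hq11 hq12 hq13
      simp at hsplit
      simp [hq0, hq1, hq2, hq3, hq4, hq5, hq6, hq7, hq8, hq9, hq10, hq11, hq12, hq13, hsplit, hmemF]
  · simp [pvPh1A, pvC1, pvResidualA, pv_split_one cs hsp, pv_sw_nospace cs _ hsp]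

set_option maxHeartbeats 2000000 in
theorem pv_ph2_eq (cs : List Char) : pvPh2A cs = pvC2 cs := by
  by_cases hsp : ' ' ∈ cs
  · obtain ⟨p, r, rfl, hp⟩ := pv_split_first cs hsp
    have hsplit := pv_split_two p r hp
    by_cases hmem : p ∈ (["add".toList, "Add".toList, "ADD".toList, "added".toList, "ADDED".toList, "fix".toList, "Fix".toList, "FIX".toList, "fixed".toList, "FIXED".toList, "update".toList, "Update".toList, "UPDATE".toList, "updated".toList, "UPDATED".toList, "remove".toList, "Remove".toList, "REMOVE".toList, "removed".toList, "REMOVED".toList] : List (List Char))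
    · simp only [List.mem_cons, List.not_mem_nil, or_false] at hmem
      rcases hmem with h|h|h|h|h|h|h|h|h|h|h|h|h|h|h|h|h|h|h|h <;> subst h <;>
        simp at hsplit <;>
        simp [pvPh2A, pvC2, pvMisspellA, pv_verb_lit, hsplit,
          PySem.Dict.getD_eq_get?_getD, PySem.Dict.get?_mk_cons,
          PySem.Chars.startswith, PySem.Chars.len_eq, PySem.List.slice_from]
    · have hcont : pvTables.2.contains p = false := by
        rw [← Bool.not_eq_true, PySem.Dict.contains_iff_mem_keys]
        simpa [pv_verb_lit] using hmem
      have hmm := hmem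
      simp only [List.mem_cons, List.not_mem_nil, or_false, not_or] at hmm
      obtain ⟨hq0, hq1, hq2, hq3, hq4, hq5, hq6, hq7, hq8, hq9, hq10, hq11, hq12, hq13, hq14, hq15, hq16, hq17, hq18, hq19⟩ := hmm
      simp at hq0 hq1 hq2 hq3 hq4 hq5 hq6 hq7 hq8 hq9 hq10 hq11 hq12 hq13 hq14 hq15 hq16 hq17 hq18 hq19
      have hs0 : PySem.Chars.startswith (p ++ ' ' :: r) (['a', 'd', 'd', ' '] : List Char) = false := by
        rw [show (['a', 'd', 'd', ' '] : List Char) = ['a', 'd', 'd'] ++ [' '] from rfl, pv_sw p r _ hp (by decide)]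
        simp [hq0]
      have hs1 : PySem.Chars.startswith (p ++ ' ' :: r) (['A', 'd', 'd', ' '] : List Char) = false := by
        rw [show (['A', 'd', 'd', ' '] : List Char) = ['A', 'd', 'd'] ++ [' '] from rfl, pv_sw p r _ hp (by decide)]
        simp [hq1]
      have hs2 : PySem.Chars.startswith (p ++ ' ' :: r) (['A', 'D', 'D', ' '] : List Char) = false := by
        rw [show (['A', 'D', 'D', ' '] : List Char) = ['A', 'D', 'D'] ++ [' '] from rfl, pv_sw p r _ hp (by decide)]
        simp [hq2]
      have hs3 : PySem.Chars.startswith (p ++ ' ' :: r) (['a', 'd', 'd', 'e', 'd', ' '] : List Char) = false := by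
        rw [show (['a', 'd', 'd', 'e', 'd', ' '] : List Char) = ['a', 'd', 'd', 'e', 'd'] ++ [' '] from rfl, pv_sw p r _ hp (by decide)]
        simp [hq3]
      have hs4 : PySem.Chars.startswith (p ++ ' ' :: r) (['A', 'D', 'D', 'E', 'D', ' '] : List Char) = false := by
        rw [show (['A', 'D', 'D', 'E', 'D', ' '] : List Char) = ['A', 'D', 'D', 'E', 'D'] ++ [' '] from rfl, pv_sw p r _ hp (by decide)]
        simp [hq4]
      have hs5 : PySem.Chars.startswith (p ++ ' ' :: r) (['f', 'i', 'x', ' '] : List Char) = false := by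
        rw [show (['f', 'i', 'x', ' '] : List Char) = ['f', 'i', 'x'] ++ [' '] from rfl, pv_sw p r _ hp (by decide)]
        simp [hq5]
      have hs6 : PySem.Chars.startswith (p ++ ' ' :: r) (['F', 'i', 'x', ' '] : List Char) = false := by
        rw [show (['F', 'i', 'x', ' '] : List Char) = ['F', 'i', 'x'] ++ [' '] from rfl, pv_sw p r _ hp (by decide)]
        simp [hq6]
      have hs7 : PySem.Chars.startswith (p ++ ' ' :: r) (['F', 'I', 'X', ' '] : List Char) = false := by
        rw [show (['F', 'I', 'X', ' '] : List Char) = ['F', 'I', 'X'] ++ [' '] from rfl, pv_sw p r _ hp (by decide)]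
        simp [hq7]
      have hs8 : PySem.Chars.startswith (p ++ ' ' :: r) (['f', 'i', 'x', 'e', 'd', ' '] : List Char) = false := by
        rw [show (['f', 'i', 'x', 'e', 'd', ' '] : List Char) = ['f', 'i', 'x', 'e', 'd'] ++ [' '] from rfl, pv_sw p r _ hp (by decide)]
        simp [hq8]
      have hs9 : PySem.Chars.startswith (p ++ ' ' :: r) (['F', 'I', 'X', 'E', 'D', ' '] : List Char) = false := by
        rw [show (['F', 'I', 'X', 'E', 'D', ' '] : List Char) = ['F', 'I', 'X', 'E', 'D'] ++ [' '] from rfl, pv_sw p r _ hp (by decide)]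
        simp [hq9]
      have hs10 : PySem.Chars.startswith (p ++ ' ' :: r) (['u', 'p', 'd', 'a', 't', 'e', ' '] : List Char) = false := by
        rw [show (['u', 'p', 'd', 'a', 't', 'e', ' '] : List Char) = ['u', 'p', 'd', 'a', 't', 'e'] ++ [' '] from rfl, pv_sw p r _ hp (by decide)]
        simp [hq10]
      have hs11 : PySem.Chars.startswith (p ++ ' ' :: r) (['U', 'p', 'd', 'a', 't', 'e', ' '] : List Char) = false := by
        rw [show (['U', 'p', 'd', 'a', 't', 'e', ' '] : List Char) = ['U', 'p', 'd', 'a', 't', 'e'] ++ [' '] from rfl, pv_sw p r _ hp (by decide)]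
        simp [hq11]
      have hs12 : PySem.Chars.startswith (p ++ ' ' :: r) (['U', 'P', 'D', 'A', 'T', 'E', ' '] : List Char) = false := by
        rw [show (['U', 'P', 'D', 'A', 'T', 'E', ' '] : List Char) = ['U', 'P', 'D', 'A', 'T', 'E'] ++ [' '] from rfl, pv_sw p r _ hp (by decide)]
        simp [hq12]
      have hs13 : PySem.Chars.startswith (p ++ ' ' :: r) (['u', 'p', 'd', 'a', 't', 'e', 'd', ' '] : List Char) = false := by
        rw [show (['u', 'p', 'd', 'a', 't', 'e', 'd', ' '] : List Char) = ['u', 'p', 'd', 'a', 't', 'e', 'd'] ++ [' '] from rfl, pv_sw p r _ hp (by decide)]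
        simp [hq13]
      have hs14 : PySem.Chars.startswith (p ++ ' ' :: r) (['U', 'P', 'D', 'A', 'T', 'E', 'D', ' '] : List Char) = false := by
        rw [show (['U', 'P', 'D', 'A', 'T', 'E', 'D', ' '] : List Char) = ['U', 'P', 'D', 'A', 'T', 'E', 'D'] ++ [' '] from rfl, pv_sw p r _ hp (by decide)]
        simp [hq14]
      have hs15 : PySem.Chars.startswith (p ++ ' ' :: r) (['r', 'e', 'm', 'o', 'v', 'e', ' '] : List Char) = false := by
        rw [show (['r', 'e', 'm', 'o', 'v', 'e', ' '] : List Char) = ['r', 'e', 'm', 'o', 'v', 'e'] ++ [' '] from rfl, pv_sw p r _ hp (by decide)]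
        simp [hq15]
      have hs16 : PySem.Chars.startswith (p ++ ' ' :: r) (['R', 'e', 'm', 'o', 'v', 'e', ' '] : List Char) = false := by
        rw [show (['R', 'e', 'm', 'o', 'v', 'e', ' '] : List Char) = ['R', 'e', 'm', 'o', 'v', 'e'] ++ [' '] from rfl, pv_sw p r _ hp (by decide)]
        simp [hq16]
      have hs17 : PySem.Chars.startswith (p ++ ' ' :: r) (['R', 'E', 'M', 'O', 'V', 'E', ' '] : List Char) = false := by
        rw [show (['R', 'E', 'M', 'O', 'V', 'E', ' '] : List Char) = ['R', 'E', 'M', 'O', 'V', 'E'] ++ [' '] from rfl, pv_sw p r _ hp (by decide)]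
        simp [hq17]
      have hs18 : PySem.Chars.startswith (p ++ ' ' :: r) (['r', 'e', 'm', 'o', 'v', 'e', 'd', ' '] : List Char) = false := by
        rw [show (['r', 'e', 'm', 'o', 'v', 'e', 'd', ' '] : List Char) = ['r', 'e', 'm', 'o', 'v', 'e', 'd'] ++ [' '] from rfl, pv_sw p r _ hp (by decide)]
        simp [hq18]
      have hs19 : PySem.Chars.startswith (p ++ ' ' :: r) (['R', 'E', 'M', 'O', 'V', 'E', 'D', ' '] : List Char) = false := by
        rw [show (['R', 'E', 'M', 'O', 'V', 'E', 'D', ' '] : List Char) = ['R', 'E', 'M', 'O', 'V', 'E', 'D'] ++ [' '] from rfl, pv_sw p r _ hp (by decide)]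
        simp [hq19]
      simp at hsplit
      simp [pvPh2A, pvC2, pvMisspellA, hs0, hs1, hs2, hs3, hs4, hs5, hs6, hs7, hs8, hs9, hs10, hs11, hs12, hs13, hs14, hs15, hs16, hs17, hs18, hs19,
        hsplit, hcont]
  · simp [pvPh2A, pvC2, pvMisspellA, pv_split_one cs hsp, pv_sw_nospace cs _ hsp]

theorem pv_step_eq (cs : List Char) : pvStepA cs = pvCanonB cs := by
  rw [pvStepA_decomp, pvCanonB_decomp, pv_ph1_eq, pv_ph2_eq]

-- the binary-search insertion builder realizes sorted()
theorem pv_bisect_le (out : List String) (c : String) : ∀ (n lo hi : Nat), hi - lo ≤ n → lo ≤ hi →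
    lo ≤ pvBisect out c lo hi ∧ pvBisect out c lo hi ≤ hi := by
  intro n
  induction n with
  | zero =>
    intro lo hi h1 h2
    rw [pvBisect, if_neg (by omega)]
    omega
  | succ m ih =>
    intro lo hi h1 h2
    by_cases hlt : lo < hi
    · rw [pvBisect, if_pos hlt]
      by_cases hc : out.getD ((lo + hi) / 2) "" < c
      · simp only [hc, if_pos]
        have := ih ((lo + hi) / 2 + 1) hi (by omega) (by omega)
        omega
      · simp only [hc, if_neg, not_false_iff]
        have := ih lo ((lo + hi) / 2) (by omega) (by omega)
        omega
    · rw [pvBisect, if_neg hlt]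
      omega

theorem pv_bisect_spec (out : List String) (c : String) (hpw : out.Pairwise (· ≤ ·)) :
    ∀ (n lo hi : Nat), hi - lo ≤ n → lo ≤ hi → hi ≤ out.length →
    (∀ j (_ : j < out.length), j < lo → out[j] < c) →
    (∀ j (_ : j < out.length), hi ≤ j → ¬ out[j] < c) →
    (∀ j (_ : j < out.length), j < pvBisect out c lo hi → out[j] < c) ∧
    (∀ j (_ : j < out.length), pvBisect out c lo hi ≤ j → ¬ out[j] < c) := by
  have hmono : ∀ (j k : Nat) (_ : j ≤ k) (_ : k < out.length), out[j] ≤ out[k] := by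
    intro j k hjk hk
    rcases Nat.lt_or_ge j k with h | h
    · exact List.pairwise_iff_getElem.mp hpw j k (by omega) hk h
    · have : j = k := by omega
      subst this; exact le_refl _
  intro n
  induction n with
  | zero =>
    intro lo hi h1 h2 _ hlo hhi
    rw [pvBisect, if_neg (by omega)]
    exact ⟨hlo, fun j hj hle => hhi j hj (by omega)⟩
  | succ m ih =>
    intro lo hi h1 h2 hlen hlo hhi
    by_cases hlt : lo < hi
    · rw [pvBisect, if_pos hlt]
      have hmid : (lo + hi) / 2 < out.length := by omega
      by_cases hc : out.getD ((lo + hi) / 2) "" < c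
      · simp only [hc, if_pos]
        rw [List.getD_eq_getElem out "" hmid] at hc
        refine ih ((lo + hi) / 2 + 1) hi (by omega) (by omega) hlen ?_ hhi
        intro j hj hjlt
        exact lt_of_le_of_lt (hmono j ((lo + hi) / 2) (by omega) hmid) hc
      · simp only [hc, if_neg, not_false_iff]
        rw [List.getD_eq_getElem out "" hmid] at hc
        refine ih lo ((lo + hi) / 2) (by omega) (by omega) (by omega) hlo ?_
        intro j hj hje
        exact fun hcon => hc (lt_of_le_of_lt (hmono ((lo + hi) / 2) j hje hj) hcon)
    · rw [pvBisect, if_neg hlt]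
      exact ⟨hlo, fun j hj hle => hhi j hj (by omega)⟩

theorem pv_insertIdx_eq (l : List String) (i : Nat) (a : String) (h : i ≤ l.length) :
    l.insertIdx i a = l.take i ++ a :: l.drop i := by
  induction l generalizing i with
  | nil => simp at h; simp [h]
  | cons x t ih =>
    cases i with
    | zero => simp
    | succ j => simp [List.insertIdx_succ_cons, ih j (by simpa using h)]

theorem pv_insort_perm (out : List String) (c : String) : (pvInsort out c).Perm (c :: out) := by
  exact List.perm_insertIdx c out (pv_bisect_le out c out.length 0 out.length (by omega) (by omega)).2

theorem pv_insort_pairwise (out : List String) (c : String) (h : out.Pairwise (· ≤ ·)) :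
    (pvInsort out c).Pairwise (· ≤ ·) := by
  have hle := (pv_bisect_le out c out.length 0 out.length (by omega) (by omega)).2
  obtain ⟨hfst, hsnd⟩ := pv_bisect_spec out c h out.length 0 out.length (by omega) (by omega)
    (le_refl _) (fun j hj hlt => absurd hlt (by omega)) (fun j hj hge => absurd hj (by omega))
  unfold pvInsort
  rw [pv_insertIdx_eq out _ c hle]
  set i := pvBisect out c 0 out.length with hi
  have htake : ∀ y ∈ out.take i, y < c := by
    intro y hy
    obtain ⟨j, hj, rfl⟩ := List.mem_take_iff_getElem.mp hy
    exact hfst j (by omega) (by omega)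
  have hdrop : ∀ y ∈ out.drop i, c ≤ y := by
    intro y hy
    obtain ⟨j, hj, rfl⟩ := List.mem_iff_getElem.mp hy
    rw [List.getElem_drop]
    exact le_of_not_gt (hsnd (i + j) (by simp at hj; omega) (by omega))
  refine List.pairwise_append.mpr ⟨h.sublist (List.take_sublist i out), ?_, ?_⟩
  · refine List.pairwise_cons.mpr ⟨hdrop, h.sublist (List.drop_sublist i out)⟩
  · intro a ha b hb
    rcases List.mem_cons.mp hb with rfl | hb
    · exact le_of_lt (htake a ha)
    · exact le_trans (le_of_lt (htake a ha)) (hdrop b hb)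

theorem pv_build (f : String → String) (l : List String) : ∀ (acc : List String), acc.Pairwise (· ≤ ·) →
    (l.foldl (fun o m => pvInsort o (f m)) acc).Perm (l.map f ++ acc) ∧
    (l.foldl (fun o m => pvInsort o (f m)) acc).Pairwise (· ≤ ·) := by
  induction l with
  | nil => intro acc hacc; exact ⟨by simp, hacc⟩
  | cons m t ih =>
    intro acc hacc
    simp only [List.foldl_cons, List.map_cons, List.cons_append]
    obtain ⟨hperm, hpw⟩ := ih (pvInsort acc (f m)) (pv_insort_pairwise acc (f m) hacc)
    refine ⟨hperm.trans ?_, hpw⟩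
    exact ((pv_insort_perm acc (f m)).append_left (t.map f)).trans List.perm_middle

-- ===== VERDICT (by name: the statement is the Claim_ definition above) =====
theorem commit_messages_to_names_spec : Claim_equal_commit_messages_to_names := by
  intro l _
  unfold Spec_commit_messages_to_names commit_messages_to_names commit_messages_to_names_alt
  simp only [PySem.List.foldl_append_singleton_eq_map, List.nil_append, pv_step_eq]
  obtain ⟨hperm, hpw⟩ := pv_build (fun s => String.ofList (pvCanonB s.toList)) l [] (List.Pairwise.nil)
  exact PySem.List.sorted_id_eq_of_perm_of_pairwise _ _ (by simpa using hperm) hpw
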